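-- pv_equiv track=rewrite | github.com/PatricSperlingsson/advent-of-code | 2025/9-2.py | anchored_rectangle_search
-- ===== SOURCE A (Python) =====
-- def anchored_rectangle_search(coords, intervals_per_row, ymin, anchor):
--     """
--     Find the largest rectangle inside the polygon anchored at a given point.
--     Anchor is the bottom-right corner (x2,y2).
--     For each candidate top-left corner (x1,y1):
--       - Validate that all rows between y2..y1 cover [x1..x2].
--       - If valid, compute area and update best result.
--     """
--     x2, y2 = anchor
--     largest_area = 0
--     best_pair = None
--
--     for (x1, y1) in coords:
--         # Candidate must be above and to the left of anchor
--         if x1 <= x2 and y1 >= y2: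
--             valid = True
--             # Check row coverage
--             for y in range(y2, y1 + 1):
--                 intervals = intervals_per_row[y - ymin]
--                 covered = any(a <= x1 and b >= x2 for a, b in intervals)
--                 if not covered:
--                     valid = False
--                     break
--             if valid:
--                 area = (x2 - x1 + 1) * (y1 - y2 + 1)
--                 if area > largest_area:
--                     largest_area = area
--                     best_pair = ((x1, y1), (x2, y2))
--     return largest_area, best_pair
-- ===== SOURCE B (Python) =====
-- def anchored_rectangle_search(coords, intervals_per_row, ymin, anchor):
--     """
--     Same answer by a lazy row sweep instead of per-candidate rescans.
--     Precompute pref[k] = max over rows y2..y2+k of the minimal left end among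
--     intervals reaching x2 (None = some row uncoverable); the sweep stops as
--     soon as no remaining candidate could still pass, so each candidate is then
--     validated by one O(1) lookup.
--     """
--     x2, y2 = anchor
--     cands = [(x1, y1) for (x1, y1) in coords if x1 <= x2 and y1 >= y2]
--     if not cands:
--         return 0, None
--     order = sorted(cands, key=lambda c: c[1])
--     # ann: candidates in descending y1, each paired with the running max of x1
--     # seen so far, i.e. the max x1 among candidates whose y1 is >= its own
--     ann = []
--     m = None
--     for x1, y1 in reversed(order):
--         if m is None or x1 > m:
--             m = x1
--         ann.append((y1, m))
--     max_y = order[-1][1]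
--     pref = []
--     rem = ann  # rem[-1] = remaining candidate with smallest y1
--     y = y2
--     while y <= max_y:
--         while rem and rem[-1][0] < y:
--             rem.pop()
--         if not rem:
--             break
--         if pref and (pref[-1] is None or pref[-1] > rem[-1][1]):
--             break  # every remaining candidate already fails on an earlier row
--         row = intervals_per_row[y - ymin]
--         m = None
--         for a, b in row:
--             if b >= x2 and (m is None or a < m):
--                 m = a
--         if pref:
--             prev = pref[-1]
--             m = None if (prev is None or m is None) else max(prev, m)
--         pref.append(m)
--         y += 1
--     largest_area = 0
--     best_pair = None
--     for (x1, y1) in cands: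
--         k = y1 - y2
--         if k < len(pref) and pref[k] is not None and pref[k] <= x1:
--             area = (x2 - x1 + 1) * (y1 - y2 + 1)
--             if area > largest_area:
--                 largest_area = area
--                 best_pair = ((x1, y1), (x2, y2))
--     return largest_area, best_pair
-- ===== Notes on version B (the rewrite author's own statement) =====
-- stated objective: faster
-- what changed: Instead of re-scanning every row's interval list for every candidate corner, B sorts the candidates by y1, annotates them with suffix maxima of x1, makes one lazy upward row sweep building a prefix-max of per-row minimal left ends (stopping exactly when no remaining candidate can still pass), and then validates each candidate with one O(1) table lookup.
import Mathlib
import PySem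

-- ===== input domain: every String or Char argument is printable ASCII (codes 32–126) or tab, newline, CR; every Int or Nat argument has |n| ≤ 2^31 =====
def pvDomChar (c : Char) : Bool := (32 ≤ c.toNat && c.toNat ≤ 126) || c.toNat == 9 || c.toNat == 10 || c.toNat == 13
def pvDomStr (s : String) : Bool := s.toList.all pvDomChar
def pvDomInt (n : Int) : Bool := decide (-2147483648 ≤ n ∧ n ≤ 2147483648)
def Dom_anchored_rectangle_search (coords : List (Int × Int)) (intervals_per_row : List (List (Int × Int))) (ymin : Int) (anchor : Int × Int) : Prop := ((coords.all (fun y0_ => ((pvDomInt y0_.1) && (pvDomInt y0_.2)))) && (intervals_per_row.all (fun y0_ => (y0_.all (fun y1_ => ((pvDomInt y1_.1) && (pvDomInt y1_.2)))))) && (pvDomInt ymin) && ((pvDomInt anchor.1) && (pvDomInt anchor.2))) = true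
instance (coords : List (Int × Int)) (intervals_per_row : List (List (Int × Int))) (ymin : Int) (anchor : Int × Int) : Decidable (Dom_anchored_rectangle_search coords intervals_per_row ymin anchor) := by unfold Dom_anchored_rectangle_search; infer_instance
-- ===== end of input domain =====

-- B replaces A's per-candidate rescan of every row's intervals by one lazy upward row
-- sweep (prefix-max of per-row minimal left ends, stopped as soon as no remaining
-- candidate can pass), so each candidate is validated by one O(1) lookup (faster).

-- ===== PORT A =====

-- intervals_per_row[y - ymin]  (Python negative-index semantics; .getD [] is unreachable under Pre_)
def pvRowAt (ipr : List (List (Int × Int))) (ymin y : Int) : List (Int × Int) :=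
  (PySem.List.pyGet? ipr (y - ymin)).getD []

-- covered = any(a <= x1 and b >= x2 for a, b in intervals)
def pvCovered (row : List (Int × Int)) (x1 x2 : Int) : Bool :=
  row.any (fun ab => decide (ab.1 ≤ x1) && decide (ab.2 ≥ x2))

-- the inner 'for y in range(y2, y1+1)' loop with its early break on an uncovered row
-- (one recursive step per y, so it stops exactly where the Python loop breaks)
def pvCheckFrom (ipr : List (List (Int × Int))) (ymin x1 x2 : Int) : Nat → Int → Bool
  | 0, _ => true
  | n + 1, y =>
      if pvCovered (pvRowAt ipr ymin y) x1 x2 then pvCheckFrom ipr ymin x1 x2 n (y + 1)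
      else false

def anchored_rectangle_search (coords : List (Int × Int)) (intervals_per_row : List (List (Int × Int))) (ymin : Int) (anchor : Int × Int) : Int × (Option ((Int × Int) × (Int × Int))) :=
  coords.foldl (fun st c =>
    if c.1 ≤ anchor.1 ∧ c.2 ≥ anchor.2 then
      if pvCheckFrom intervals_per_row ymin c.1 anchor.1 (c.2 + 1 - anchor.2).toNat anchor.2 then
        if (anchor.1 - c.1 + 1) * (c.2 - anchor.2 + 1) > st.1 then
          ((anchor.1 - c.1 + 1) * (c.2 - anchor.2 + 1), some ((c.1, c.2), (anchor.1, anchor.2)))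
        else st
      else st
    else st) (0, none)

-- ===== PORT B =====

-- the inner 'for a, b in row' loop: minimal a among intervals with b >= x2 (None if there is none)
def pvRowMinStep (x2 : Int) (m : Option Int) (ab : Int × Int) : Option Int :=
  match m with
  | none => if ab.2 ≥ x2 then some ab.1 else none
  | some v => if ab.2 ≥ x2 ∧ ab.1 < v then some ab.1 else some v

def pvRowMin (row : List (Int × Int)) (x2 : Int) : Option Int :=
  row.foldl (pvRowMinStep x2) none

-- m = None if (prev is None or m is None) else max(prev, m)
def pvCombine : Option Int → Option Int → Option Int
  | some c, some m => some (max c m)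
  | _, _ => none

-- bound is not None and bound <= x1
def pvOk : Option Int → Int → Bool
  | none, _ => false
  | some v, x1 => decide (v ≤ x1)

-- Source B's ann, held in ascending-y1 order (Source B builds the reversed list and pops
-- from its end; this list consumed from the front is the same sequence of values):
-- each candidate's y1 paired with the running max of x1 over candidates with y1 >= it
def pvAnnotate : List (Int × Int) → List (Int × Int)
  | [] => []
  | c :: rest =>
      match pvAnnotate rest with
      | [] => [(c.2, c.1)]
      | e :: tl => (c.2, if c.1 > e.2 then c.1 else e.2) :: e :: tl

-- the 'while y <= max_y' sweep, one recursive step per row; rem is consumed from the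
-- front ('while rem and rem[-1][0] < y: rem.pop()' = dropWhile); pref grows at the back
def pvSweepGo (ipr : List (List (Int × Int))) (ymin x2 : Int) :
    Nat → Int → List (Int × Int) → List (Option Int) → List (Option Int)
  | 0, _, _, pref => pref
  | n + 1, y, rem, pref =>
      let rem' := rem.dropWhile (fun e => decide (e.1 < y))
      match rem' with
      | [] => pref
      | e :: _ =>
          let brk : Bool := match pref.getLast? with
            | some none => true
            | some (some v) => decide (v > e.2)
            | none => false
          if brk then pref
          else
            let m := pvRowMin (pvRowAt ipr ymin y) x2
            let m' := match pref.getLast? with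
              | none => m
              | some prev => pvCombine prev m
            pvSweepGo ipr ymin x2 n (y + 1) rem' (pref ++ [m'])

def anchored_rectangle_search_alt (coords : List (Int × Int)) (intervals_per_row : List (List (Int × Int))) (ymin : Int) (anchor : Int × Int) : Int × (Option ((Int × Int) × (Int × Int))) :=
  match coords.filter (fun c => decide (c.1 ≤ anchor.1 ∧ c.2 ≥ anchor.2)) with
  | [] => (0, none)
  | c0 :: rest =>
      let order := PySem.List.sorted (c0 :: rest) (fun c => c.2) false
      let ann := pvAnnotate order
      let maxY := ((PySem.List.pyGet? order (-1)).getD c0).2    -- order[-1][1]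
      let pref := pvSweepGo intervals_per_row ymin anchor.1 (maxY + 1 - anchor.2).toNat anchor.2 ann []
      (c0 :: rest).foldl (fun st c =>
        if decide (c.2 - anchor.2 < (pref.length : Int)) && pvOk (pref.getD (c.2 - anchor.2).toNat none) c.1 then
          if (anchor.1 - c.1 + 1) * (c.2 - anchor.2 + 1) > st.1 then
            ((anchor.1 - c.1 + 1) * (c.2 - anchor.2 + 1), some ((c.1, c.2), (anchor.1, anchor.2)))
          else st
        else st) (0, none)

-- ===== PRECONDITION & SPEC =====
-- Pre_ excludes exactly the inputs on which Python A raises IndexError: some candidate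
-- corner whose row scan y2..y1 reaches an out-of-range lookup intervals_per_row[y - ymin]
-- before hitting an uncovered row (rows scanned upward from y2 stay in Python's index
-- range precisely until ymin + len).  B raises on exactly the same inputs.
def Pre_anchored_rectangle_search (coords : List (Int × Int)) (intervals_per_row : List (List (Int × Int))) (ymin : Int) (anchor : Int × Int) : Prop :=
  ∀ c ∈ coords, c.1 ≤ anchor.1 → c.2 ≥ anchor.2 →
    PySem.Raise.InRange intervals_per_row.length (anchor.2 - ymin) ∧
    (c.2 ≥ ymin + intervals_per_row.length →
      ∃ y ∈ PySem.List.pyRange anchor.2 (ymin + intervals_per_row.length) 1,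
        ¬ ∃ ab ∈ (PySem.List.pyGet? intervals_per_row (y - ymin)).getD [],
            ab.1 ≤ c.1 ∧ ab.2 ≥ anchor.1)
instance (coords : List (Int × Int)) (intervals_per_row : List (List (Int × Int))) (ymin : Int) (anchor : Int × Int) : Decidable (Pre_anchored_rectangle_search coords intervals_per_row ymin anchor) := by unfold Pre_anchored_rectangle_search; infer_instance

def pvWitness_anchored_rectangle_search : (List (Int × Int)) × (List (List (Int × Int))) × Int × (Int × Int) :=
  ([(1, 2)], [[(0, 3)], [(0, 3)], [(1, 2)]], 0, (2, 1))

def Spec_anchored_rectangle_search (coords : List (Int × Int)) (intervals_per_row : List (List (Int × Int))) (ymin : Int) (anchor : Int × Int) (out : Int × (Option ((Int × Int) × (Int × Int)))) : Prop := out = anchored_rectangle_search_alt coords intervals_per_row ymin anchor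
instance (coords : List (Int × Int)) (intervals_per_row : List (List (Int × Int))) (ymin : Int) (anchor : Int × Int) (out : Int × (Option ((Int × Int) × (Int × Int)))) : Decidable (Spec_anchored_rectangle_search coords intervals_per_row ymin anchor out) := by unfold Spec_anchored_rectangle_search; infer_instance

-- ===== CLAIM (what is proved, stated in full; the proofs are below) =====
def Claim_equal_anchored_rectangle_search : Prop := ∀ (coords : List (Int × Int)) (intervals_per_row : List (List (Int × Int))) (ymin : Int) (anchor : Int × Int), Dom_anchored_rectangle_search coords intervals_per_row ymin anchor → Pre_anchored_rectangle_search coords intervals_per_row ymin anchor → Spec_anchored_rectangle_search coords intervals_per_row ymin anchor (anchored_rectangle_search coords intervals_per_row ymin anchor)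

-- ===== LEMMAS AND PROOFS =====

-- mathematical prefix-combine of the per-row minima, row y2+k last
def pvPrefN (f : Int → Option Int) (y2 : Int) : Nat → Option Int
  | 0 => f y2
  | k + 1 => pvCombine (pvPrefN f y2 k) (f (y2 + (k + 1 : Nat)))

lemma pvCheckFrom_eq_all (ipr : List (List (Int × Int))) (ymin x1 x2 : Int) (n : Nat) :
    ∀ y : Int, pvCheckFrom ipr ymin x1 x2 n y
      = (List.range n).all (fun j => pvCovered (pvRowAt ipr ymin (y + j)) x1 x2) := by
  induction n with
  | zero => intro y; rfl
  | succ n ih =>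
      intro y
      rw [pvCheckFrom, List.range_succ_eq_map, List.all_cons, List.all_map]
      by_cases h : pvCovered (pvRowAt ipr ymin y) x1 x2 = true
      · rw [ih (y + 1)]
        simp only [h, if_pos]
        simp only [Nat.cast_zero, add_zero, h, Bool.true_and]
        congr 1
        funext j
        simp only [Function.comp]
        norm_num
        ring_nf
      · simp [h]

lemma pvRowMin_fold (row : List (Int × Int)) (x1 x2 : Int) (m : Option Int) :
    pvOk (row.foldl (pvRowMinStep x2) m) x1 = (pvOk m x1 || pvCovered row x1 x2) := by
  induction row generalizing m with
  | nil => simp [pvCovered]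
  | cons ab rest ih =>
      rw [List.foldl_cons, ih]
      have hstep : pvOk (pvRowMinStep x2 m ab) x1
          = (pvOk m x1 || (decide (ab.1 ≤ x1) && decide (ab.2 ≥ x2))) := by
        rcases m with _ | v
        · by_cases h2 : ab.2 ≥ x2 <;> simp [pvRowMinStep, pvOk, h2]
        · by_cases h2 : ab.2 ≥ x2 <;> by_cases hav : ab.1 < v <;>
            simp [pvRowMinStep, pvOk, h2, hav] <;> omega
      rw [hstep]
      simp [pvCovered, List.any_cons, Bool.or_assoc]

lemma pvRowMin_ok (row : List (Int × Int)) (x1 x2 : Int) :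
    pvOk (pvRowMin row x2) x1 = pvCovered row x1 x2 := by
  rw [pvRowMin, pvRowMin_fold]; rfl

lemma pvOk_combine (c m : Option Int) (x1 : Int) :
    pvOk (pvCombine c m) x1 = (pvOk c x1 && pvOk m x1) := by
  rcases c with _ | a <;> rcases m with _ | b <;> simp [pvCombine, pvOk]

-- pvOk of the prefix-combine = 'all rows so far covered'
lemma pvPrefN_ok (f : Int → Option Int) (y2 x1 : Int) (k : Nat) :
    pvOk (pvPrefN f y2 k) x1 = (List.range (k + 1)).all (fun j => pvOk (f (y2 + j)) x1) := by
  induction k with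
  | zero => simp [pvPrefN]
  | succ k ih =>
      rw [pvPrefN, pvOk_combine, ih, List.range_succ (n := k + 1), List.all_append]
      simp

lemma pvPrefN_ok_mono (f : Int → Option Int) (y2 x1 : Int) (j k : Nat) (hjk : j ≤ k)
    (hk : pvOk (pvPrefN f y2 k) x1 = true) : pvOk (pvPrefN f y2 j) x1 = true := by
  rw [pvPrefN_ok] at hk ⊢
  rw [List.all_eq_true] at hk ⊢
  intro i hi
  exact hk i (by simp at hi ⊢; omega)

-- A's candidate check as pvOk of the prefix-combine
lemma pvCheck_eq_prefN (ipr : List (List (Int × Int))) (ymin x1 x2 y2 y1 : Int) (h : y2 ≤ y1) :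
    pvCheckFrom ipr ymin x1 x2 ((y1 + 1 - y2).toNat) y2
      = pvOk (pvPrefN (fun y => pvRowMin (pvRowAt ipr ymin y) x2) y2 ((y1 - y2).toNat)) x1 := by
  rw [pvCheckFrom_eq_all, pvPrefN_ok]
  have : (y1 + 1 - y2).toNat = (y1 - y2).toNat + 1 := by omega
  rw [this]
  congr 1
  funext j
  simp [pvRowMin_ok]

-- structure of pvAnnotate: head key is the candidate's y1, head bound dominates all x1's
lemma pvAnnotate_cons (c : Int × Int) (rest : List (Int × Int)) :
    ∃ M, pvAnnotate (c :: rest) = (c.2, M) :: pvAnnotate rest ∧ c.1 ≤ M ∧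
      ∀ e ∈ pvAnnotate rest, e.2 ≤ M := by
  induction rest generalizing c with
  | nil => exact ⟨c.1, by simp [pvAnnotate], le_refl _, by simp [pvAnnotate]⟩
  | cons d t ih =>
      obtain ⟨Md, hd, hdle, hdall⟩ := ih d
      refine ⟨if c.1 > Md then c.1 else Md, ?_, ?_, ?_⟩
      · rw [show pvAnnotate (c :: d :: t) = match pvAnnotate (d :: t) with
          | [] => [(c.2, c.1)]
          | e :: tl => (c.2, if c.1 > e.2 then c.1 else e.2) :: e :: tl from rfl, hd]
      · split <;> omega
      · intro e he
        rw [hd] at he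
        rcases List.mem_cons.mp he with rfl | he'
        · simp only
          split <;> omega
        · have := hdall e he'
          split <;> omega

lemma pvAnnotate_head_bound (order : List (Int × Int)) (e : Int × Int) (tl : List (Int × Int))
    (h : pvAnnotate order = e :: tl) : ∀ c ∈ order, c.1 ≤ e.2 := by
  induction order generalizing e tl with
  | nil => simp [pvAnnotate] at h
  | cons c rest ih =>
      obtain ⟨M, hM, hcM, hall⟩ := pvAnnotate_cons c rest
      rw [hM] at h
      obtain ⟨rfl, rfl⟩ := List.cons_eq_cons.mp h
      intro d hd
      rcases List.mem_cons.mp hd with rfl | hd'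
      · exact hcM
      · cases hrest : pvAnnotate rest with
        | nil =>
            have : rest = [] := by
              cases rest with
              | nil => rfl
              | cons a b =>
                  obtain ⟨M', hM', _, _⟩ := pvAnnotate_cons a b
                  rw [hM'] at hrest; simp at hrest
            simp [this] at hd'
        | cons e' tl' =>
            have h1 := ih e' tl' hrest d hd'
            have h2 : e'.2 ≤ M := hall e' (by rw [hrest]; exact List.mem_cons_self)
            exact le_trans h1 h2

lemma pvAnnotate_drop (order : List (Int × Int)) (y' : Int) :
    ((pvAnnotate order).dropWhile (fun e => decide (e.1 < y')) = [] → ∀ c ∈ order, c.2 < y')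
    ∧ (∀ e tl, (pvAnnotate order).dropWhile (fun e => decide (e.1 < y')) = e :: tl →
        ∀ c ∈ order, c.2 ≥ y' → c.1 ≤ e.2) := by
  induction order with
  | nil => simp [pvAnnotate]
  | cons c rest ih =>
      obtain ⟨M, hM, hcM, hall⟩ := pvAnnotate_cons c rest
      rw [hM]
      by_cases hy : c.2 < y'
      · rw [List.dropWhile_cons_of_pos (by simpa using hy)]
        constructor
        · intro h d hd
          rcases List.mem_cons.mp hd with rfl | hd'
          · exact hy
          · exact ih.1 h d hd'
        · intro e tl he d hd hdy
          rcases List.mem_cons.mp hd with rfl | hd'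
          · omega
          · exact ih.2 e tl he d hd' hdy
      · rw [List.dropWhile_cons_of_neg (by simpa using hy)]
        refine ⟨by simp, ?_⟩
        rintro e tl he d hd _
        obtain ⟨rfl, rfl⟩ := List.cons_eq_cons.mp he.symm
        exact pvAnnotate_head_bound (c :: rest) _ _ hM d hd

-- dropping at a weaker threshold first does not change a dropWhile
lemma dropWhile_dropWhile {α : Type} (p q : α → Bool) (l : List α) (h : ∀ x, p x → q x) :
    (l.dropWhile p).dropWhile q = l.dropWhile q := by
  induction l with
  | nil => rfl
  | cons a t ih =>
      by_cases hp : p a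
      · rw [List.dropWhile_cons_of_pos hp, ih, List.dropWhile_cons_of_pos (h a hp)]
      · rw [List.dropWhile_cons_of_neg (by simpa using hp)]

-- the sweep invariant: entries are the prefix-combines, and if the sweep stopped early
-- then every candidate reaching the stop row already fails on the last computed prefix
lemma pvSweep_spec (ipr : List (List (Int × Int))) (ymin x2 y2 : Int)
    (cands ann0 : List (Int × Int))
    (HN : ∀ y', (ann0.dropWhile (fun e => decide (e.1 < y')) = [] → ∀ c ∈ cands, c.2 < y'))
    (HQ : ∀ y' e tl, ann0.dropWhile (fun e => decide (e.1 < y')) = e :: tl →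
        ∀ c ∈ cands, c.2 ≥ y' → c.1 ≤ e.2) :
    ∀ (n t : Nat) (rem : List (Int × Int)) (pref : List (Option Int)),
      pref.length = t →
      (∀ k, k < t → pref.getD k none = pvPrefN (fun y => pvRowMin (pvRowAt ipr ymin y) x2) y2 k) →
      (∀ y', y2 + t ≤ y' → rem.dropWhile (fun e => decide (e.1 < y'))
          = ann0.dropWhile (fun e => decide (e.1 < y'))) →
      (∀ k, k < (pvSweepGo ipr ymin x2 n (y2 + t) rem pref).length →
          (pvSweepGo ipr ymin x2 n (y2 + t) rem pref).getD k none
            = pvPrefN (fun y => pvRowMin (pvRowAt ipr ymin y) x2) y2 k)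
      ∧ (pvSweepGo ipr ymin x2 n (y2 + t) rem pref).length ≤ t + n
      ∧ ((pvSweepGo ipr ymin x2 n (y2 + t) rem pref).length < t + n →
          ∀ c ∈ cands, c.2 ≥ y2 + (pvSweepGo ipr ymin x2 n (y2 + t) rem pref).length →
            ∃ j : Nat, (pvSweepGo ipr ymin x2 n (y2 + t) rem pref).length = j + 1 ∧
              pvOk (pvPrefN (fun y => pvRowMin (pvRowAt ipr ymin y) x2) y2 j) c.1 = false) := by
  intro n
  induction n with
  | zero =>
      intro t rem pref hlen hP _
      refine ⟨?_, ?_, ?_⟩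
      · intro k hk; exact hP k (by simpa [pvSweepGo, hlen] using hk)
      · simp [pvSweepGo, hlen]
      · intro h; simp [pvSweepGo, hlen] at h
  | succ n ih =>
      intro t rem pref hlen hP hRem
      have hlink := hRem (y2 + t) le_rfl
      rw [pvSweepGo]
      cases hrem' : rem.dropWhile (fun e => decide (e.1 < (y2 + (t:Int)))) with
      | nil =>
          simp only
          refine ⟨fun k hk => hP k (by omega), by omega, ?_⟩
          intro _ c hc hcy
          have hlt := HN (y2 + t) (hlink ▸ hrem') c hc
          rw [hlen] at hcy
          omega
      | cons e tl =>
          simp only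
          set brk : Bool := (match pref.getLast? with
            | some none => true
            | some (some v) => decide (v > e.2)
            | none => false) with hbrk
          by_cases hb : brk = true
          · rw [if_pos hb]
            refine ⟨fun k hk => hP k (by omega), by omega, ?_⟩
            intro _ c hc hcy
            rw [hlen] at hcy
            -- pref nonempty: getLast? is some
            have hne : pref ≠ [] := by
              intro h0
              rw [hbrk, h0] at hb
              simp at hb
            have ht1 : 1 ≤ t := by
              cases pref with
              | nil => exact absurd rfl hne
              | cons a b => simp at hlen; omega
            have hlast : pref.getLast? = some (pref.getD (t-1) none) := by
              rw [List.getLast?_eq_getElem?, List.getD_eq_getElem?_getD]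
              cases hg : pref[pref.length - 1]? with
              | none => rw [List.getElem?_eq_none_iff] at hg; omega
              | some v => rw [hlen] at hg; simp [hg]
            have hlastP : pref.getD (t-1) none
                = pvPrefN (fun y => pvRowMin (pvRowAt ipr ymin y) x2) y2 (t-1) := hP _ (by omega)
            refine ⟨t - 1, ⟨by omega, ?_⟩⟩
            rw [← hlastP]
            have hcx : c.1 ≤ e.2 := HQ (y2 + t) e tl (hlink ▸ hrem') c hc hcy
            rw [hlast] at hbrk
            cases hv : pref.getD (t-1) none with
            | none => simp [pvOk]
            | some v =>
                rw [hv] at hbrk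
                simp only at hbrk
                have hvgt : v > e.2 := by
                  by_contra hvle
                  rw [hbrk] at hb
                  simp [hvle] at hb
                simp [pvOk]
                omega
          · rw [if_neg hb]
            have hcast : (y2 + (t:Int)) + 1 = y2 + ((t+1 : Nat) : Int) := by push_cast; ring
            have hm' : (match pref.getLast? with
                | none => pvRowMin (pvRowAt ipr ymin (y2 + (t:Int))) x2
                | some prev => pvCombine prev (pvRowMin (pvRowAt ipr ymin (y2 + (t:Int))) x2))
                = pvPrefN (fun y => pvRowMin (pvRowAt ipr ymin y) x2) y2 t := by
              cases t with
              | zero =>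
                  have : pref = [] := List.length_eq_zero_iff.mp hlen
                  subst this
                  simp [pvPrefN]
              | succ s =>
                  have hne : pref ≠ [] := by
                    intro h0; rw [h0] at hlen; simp at hlen
                  have hlast : pref.getLast? = some (pref.getD s none) := by
                    rw [List.getLast?_eq_getElem?, List.getD_eq_getElem?_getD]
                    cases hg : pref[pref.length - 1]? with
                    | none => rw [List.getElem?_eq_none_iff] at hg; omega
                    | some v => rw [hlen] at hg; simp at hg; simp [hg]
                  rw [hlast, hP s (by omega)]
                  rfl
            have := ih (t+1) (e :: tl)
              (pref ++ [(match pref.getLast? with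
                | none => pvRowMin (pvRowAt ipr ymin (y2 + (t:Int))) x2
                | some prev => pvCombine prev (pvRowMin (pvRowAt ipr ymin (y2 + (t:Int))) x2))])
              (by simp [hlen])
              (by
                intro k hk
                rcases Nat.lt_succ_iff_lt_or_eq.mp hk with hk' | rfl
                · rw [List.getD_append pref _ none k (by omega), hP k hk']
                · rw [List.getD_append_right pref _ none k (by omega), hlen, Nat.sub_self]
                  simpa using hm')
              (by
                intro y' hy'
                rw [← hrem',
                  dropWhile_dropWhile _ _ _ (by intro x hx; simp at hx ⊢; push_cast at hy'; omega)]
                exact hRem y' (by push_cast at hy' ⊢; omega))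
            rw [← hcast] at this
            refine ⟨this.1, by omega, ?_⟩
            intro hlt c hc hcy
            exact this.2.2 (by omega) c hc hcy

lemma pv_ports_eq (coords : List (Int × Int)) (ipr : List (List (Int × Int)))
    (ymin : Int) (anchor : Int × Int) :
    anchored_rectangle_search coords ipr ymin anchor
      = anchored_rectangle_search_alt coords ipr ymin anchor := by
  unfold anchored_rectangle_search anchored_rectangle_search_alt
  rw [PySem.List.foldl_ite_eq_foldl_filter
    (p := fun c : Int × Int => c.1 ≤ anchor.1 ∧ c.2 ≥ anchor.2)
    (f := fun st c =>
      if pvCheckFrom ipr ymin c.1 anchor.1 (c.2 + 1 - anchor.2).toNat anchor.2 then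
        if (anchor.1 - c.1 + 1) * (c.2 - anchor.2 + 1) > st.1 then
          ((anchor.1 - c.1 + 1) * (c.2 - anchor.2 + 1), some ((c.1, c.2), (anchor.1, anchor.2)))
        else st
      else st)]
  cases hc : coords.filter (fun c => decide (c.1 ≤ anchor.1 ∧ c.2 ≥ anchor.2)) with
  | nil => rfl
  | cons c0 rest =>
      simp only []
      obtain ⟨x2, y2⟩ := anchor
      set cands : List (Int × Int) := c0 :: rest with hcands
      have hmemall : ∀ c ∈ cands, c.1 ≤ x2 ∧ c.2 ≥ y2 := by
        intro c hmem
        have : c ∈ coords.filter (fun c => decide (c.1 ≤ x2 ∧ c.2 ≥ y2)) := by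
          rw [hc]; exact hmem
        simpa using (List.mem_filter.mp this).2
      set order := PySem.List.sorted cands (fun c => c.2) false with horder
      have hmemo : ∀ c, c ∈ order ↔ c ∈ cands := fun c => PySem.List.mem_sorted _ _ _ _
      have hone : order ≠ [] := by
        rw [horder, Ne, PySem.List.sorted_eq_nil_iff]; simp [hcands]
      set maxY := ((PySem.List.pyGet? order (-1)).getD c0).2 with hmaxY
      have hmax : ∀ c ∈ cands, c.2 ≤ maxY := by
        intro c hmem
        rw [← hmemo] at hmem
        obtain ⟨p, hp, hcp⟩ := List.getElem_of_mem hmem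
        have hlastE : (PySem.List.pyGet? order (-1)).getD c0 = order[order.length - 1] := by
          rw [PySem.List.pyGet?_neg_one, List.getLast?_eq_getElem?,
            List.getElem?_eq_getElem (by omega)]
          rfl
        rw [hmaxY, hlastE, ← hcp]
        exact PySem.List.key_sorted_getElem_mono (key := fun c : Int × Int => c.2)
          (xs := cands) (by omega) (by rw [← horder]; omega)
      have hy2max : y2 ≤ maxY := le_trans (hmemall c0 (by simp [hcands])).2 (hmax c0 (by simp [hcands]))
      -- the sweep facts
      have hdrop := fun y' => pvAnnotate_drop order y'
      have HN : ∀ y', ((pvAnnotate order).dropWhile (fun e => decide (e.1 < y')) = [] →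
          ∀ c ∈ cands, c.2 < y') := by
        intro y' h c hc
        exact (hdrop y').1 h c ((hmemo c).mpr hc)
      have HQ : ∀ y' e tl, (pvAnnotate order).dropWhile (fun e => decide (e.1 < y')) = e :: tl →
          ∀ c ∈ cands, c.2 ≥ y' → c.1 ≤ e.2 := by
        intro y' e tl h c hc
        exact (hdrop y').2 e tl h c ((hmemo c).mpr hc)
      have hspec := pvSweep_spec ipr ymin x2 y2 cands (pvAnnotate order) HN HQ
        ((maxY + 1 - y2).toNat) 0 (pvAnnotate order) [] rfl (by intro k hk; omega)
        (fun _ _ => rfl)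
      rw [show y2 + ((0 : Nat) : Int) = y2 by simp] at hspec
      set res := pvSweepGo ipr ymin x2 ((maxY + 1 - y2).toNat) y2 (pvAnnotate order) [] with hres
      obtain ⟨S1, S2, S3⟩ := hspec
      apply PySem.List.foldl_congr_mem
      intro acc c hmem
      have hcand := hmemall c hmem
      have hcmax := hmax c hmem
      have hk : (c.2 - y2).toNat < (maxY + 1 - y2).toNat := by omega
      have hcond : pvCheckFrom ipr ymin c.1 x2 (c.2 + 1 - y2).toNat y2
          = (decide (c.2 - y2 < (res.length : Int)) &&
              pvOk (res.getD (c.2 - y2).toNat none) c.1) := by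
        rw [pvCheck_eq_prefN ipr ymin c.1 x2 y2 c.2 hcand.2]
        by_cases hkL : (c.2 - y2).toNat < res.length
        · rw [S1 _ hkL]
          have : decide (c.2 - y2 < (res.length : Int)) = true := by
            simp; omega
          rw [this, Bool.true_and]
        · have hLk : res.length ≤ (c.2 - y2).toNat := by omega
          have hLn : res.length < 0 + (maxY + 1 - y2).toNat := by omega
          obtain ⟨j, hj, hjf⟩ := S3 hLn c hmem (by omega)
          have hfalse : pvOk (pvPrefN (fun y => pvRowMin (pvRowAt ipr ymin y) x2) y2
              ((c.2 - y2).toNat)) c.1 = false := by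
            by_contra hcontra
            rw [Bool.not_eq_false] at hcontra
            have := pvPrefN_ok_mono _ _ _ j _ (by omega) hcontra
            rw [hjf] at this; exact Bool.false_ne_true this
          rw [hfalse]
          have : decide (c.2 - y2 < (res.length : Int)) = false := by
            simp; omega
          rw [this]; simp
      rw [hcond]

-- ===== VERDICT (by name: the statement is the Claim_ definition above) =====
theorem anchored_rectangle_search_spec : Claim_equal_anchored_rectangle_search := by
  intro coords ipr ymin anchor _ _
  unfold Spec_anchored_rectangle_search
  exact pv_ports_eq coords ipr ymin anchor
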